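-- pv_equiv track=rewrite | github.com/nikitf28/programmingproblems | py15/task1.py | findPoint
-- ===== SOURCE A (Python) =====
-- def findPoint(tree, point):
--     i = 1
--     deep = 0
--     while i <= len(tree) - 1:
--         if tree[i] == "null":
--             break
--         if tree[i] == point:
--             return deep
--         if tree[i] > point:
--             i *= 2
--         else:
--             i = i * 2 + 1
--         deep += 1
--     return -1
-- ===== SOURCE B (Python) =====
-- def findPoint(tree, point):
--     # Phase 1: materialise the implicit array heap as an explicit linked BST
--     # (a "null" label or an index past the end becomes the empty tree).
--     def build(i):
--         if i >= len(tree) or tree[i] == "null":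
--             return None
--         return (tree[i], build(i * 2), build(i * 2 + 1))
--
--     # Phase 2: standard structural BST search returning the depth.
--     def search(node, depth):
--         if node is None:
--             return -1
--         val, left, right = node
--         if val == point:
--             return depth
--         return search(left if val > point else right, depth + 1)
--
--     return search(build(1), 0)
-- ===== Notes on version B (the rewrite author's own statement) =====
-- stated objective: alternative
-- what changed: B is two-phase with a different data structure: it first converts the array-encoded heap into an explicit linked BST (None for 'null'/out-of-range), then performs a standard structural recursive BST search on that tree, instead of A's index-arithmetic while loop over the array.
import Mathlib
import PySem

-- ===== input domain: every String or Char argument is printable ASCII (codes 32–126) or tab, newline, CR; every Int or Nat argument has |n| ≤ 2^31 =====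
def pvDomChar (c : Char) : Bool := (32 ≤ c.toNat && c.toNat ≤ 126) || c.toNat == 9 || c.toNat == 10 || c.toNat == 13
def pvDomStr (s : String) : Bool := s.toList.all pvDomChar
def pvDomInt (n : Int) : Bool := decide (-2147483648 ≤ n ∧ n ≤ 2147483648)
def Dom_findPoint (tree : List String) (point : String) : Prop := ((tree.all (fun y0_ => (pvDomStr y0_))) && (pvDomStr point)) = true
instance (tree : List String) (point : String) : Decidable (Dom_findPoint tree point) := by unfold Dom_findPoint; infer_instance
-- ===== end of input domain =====

-- B re-implements the search in two phases with a different data structure: it first builds an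
-- explicit linked BST from the array encoding, then runs a standard structural BST search on it.

-- ===== PORT A =====
-- A's while loop with state (i, deep); 'i <= len(tree)-1' over ints is 'i < tree.length' for Nat i ≥ 1;
-- i ≥ 1 is carried as a hypothesis so the loop's doubling index terminates.
def findPointLoopA (tree : List String) (point : String) (i : Nat) (deep : Int)
    (hi : 1 ≤ i) : Int :=
  if h : i < tree.length then
    if tree[i] = "null" then -1
    else if tree[i] = point then deep
    else if point < tree[i] then
      findPointLoopA tree point (i * 2) (deep + 1) (by omega)
    else
      findPointLoopA tree point (i * 2 + 1) (deep + 1) (by omega)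
  else -1
termination_by tree.length - i
decreasing_by all_goals omega

def findPoint (tree : List String) (point : String) : Int :=
  findPointLoopA tree point 1 0 (by omega)

-- ===== PORT B =====
-- B's explicit tree: Python's None is `nil`, the tuple (val, left, right) is `node`.
inductive BTree where
  | nil : BTree
  | node : String → BTree → BTree → BTree
deriving DecidableEq, Repr

-- Phase 1 of Source B: build(i) — materialise the implicit heap as a linked BST.
def buildTree (tree : List String) (i : Nat) (hi : 1 ≤ i) : BTree :=
  if h : i < tree.length then
    if tree[i] = "null" then .nil
    else .node tree[i] (buildTree tree (i * 2) (by omega)) (buildTree tree (i * 2 + 1) (by omega))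
  else .nil
termination_by tree.length - i
decreasing_by all_goals omega

-- Phase 2 of Source B: search(node, depth) — structural recursive BST search.
def searchTree (point : String) (t : BTree) (deep : Int) : Int :=
  match t with
  | .nil => -1
  | .node v l r =>
      if v = point then deep
      else searchTree point (if point < v then l else r) (deep + 1)
termination_by t
decreasing_by split <;> simp <;> omega

def findPoint_alt (tree : List String) (point : String) : Int :=
  searchTree point (buildTree tree 1 (by omega)) 0

-- ===== PRECONDITION & SPEC =====
def Spec_findPoint (tree : List String) (point : String) (out : Int) : Prop := out = findPoint_alt tree point
instance (tree : List String) (point : String) (out : Int) : Decidable (Spec_findPoint tree point out) := by unfold Spec_findPoint; infer_instance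

-- ===== CLAIM (what is proved, stated in full; the proofs are below) =====
def Claim_equal_findPoint : Prop := ∀ (tree : List String) (point : String), Dom_findPoint tree point → Spec_findPoint tree point (findPoint tree point)

-- ===== LEMMAS AND PROOFS =====

-- A's loop from index i at depth `deep` computes exactly the structural search in the
-- subtree built from index i.
theorem loopA_eq_search (tree : List String) (point : String) :
    ∀ (i : Nat) (hi : 1 ≤ i) (deep : Int),
      findPointLoopA tree point i deep hi = searchTree point (buildTree tree i hi) deep := by
  intro i hi deep
  fun_induction buildTree tree i hi generalizing deep with
  | case1 i hi h hnull =>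
      rw [findPointLoopA]
      simp [h, hnull, searchTree]
  | case2 i hi h hnull ihl ihr =>
      rw [findPointLoopA, searchTree]
      by_cases hpt : tree[i] = point
      · have hn2 : ¬ point = "null" := hpt ▸ hnull
        simp [h, hn2, hpt]
      · by_cases hlt : point < tree[i]
        · simp [h, hnull, hpt, hlt, ihl]
        · simp [h, hnull, hpt, hlt, ihr]
  | case3 i hi h =>
      rw [findPointLoopA]
      simp [h, searchTree]

-- ===== VERDICT (by name: the statement is the Claim_ definition above) =====
theorem findPoint_spec : Claim_equal_findPoint := by
  intro tree point _
  unfold Spec_findPoint findPoint findPoint_alt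
  exact loopA_eq_search tree point 1 (by omega) 0
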